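-- pv_equiv track=rewrite | github.com/Karryisme/XSS_DDQN | ActionTable.py | action_unicode_encode
-- ===== SOURCE A (Python) =====
-- def action_unicode_encode(payload):
--     """a0: 將關鍵彈窗函數關鍵字用Unicode轉義表示（如 alert -> \\u0061\\u006c...）"""
--     # 將 'alert', 'prompt', 'confirm' 等字串中的字母轉換為 \\uXXXX 格式
--     targets = ["alert", "prompt", "confirm"]
--     result = payload
--     for t in targets:
--         if t in result:
--             encoded = "".join(["\\u{:04x}".format(ord(c)) for c in t])
--             result = result.replace(t, encoded)
--     return result
-- ===== SOURCE B (Python) =====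
-- # Hard-coded keyword -> \uXXXX escape table and one left-to-right scan of the payload
-- # (instead of three chained containment-test + full-string replace passes).
-- _ENC = {
--     "alert":   "\\u0061\\u006c\\u0065\\u0072\\u0074",
--     "prompt":  "\\u0070\\u0072\\u006f\\u006d\\u0070\\u0074",
--     "confirm": "\\u0063\\u006f\\u006e\\u0066\\u0069\\u0072\\u006d",
-- }
--
-- def action_unicode_encode(payload):
--     out = []
--     i = 0
--     n = len(payload)
--     while i < n:
--         for k, enc in _ENC.items():
--             if payload.startswith(k, i):
--                 out.append(enc)
--                 i += len(k)
--                 break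
--         else:
--             out.append(payload[i])
--             i += 1
--     return "".join(out)
-- ===== Notes on version B (the rewrite author's own statement) =====
-- stated objective: alternative
-- what changed: B replaces A's three sequential containment-test + full-string .replace passes with a hard-coded keyword->escape table and a single left-to-right scan that emits the escape whenever a keyword starts at the current index, copying one character otherwise.
import Mathlib
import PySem

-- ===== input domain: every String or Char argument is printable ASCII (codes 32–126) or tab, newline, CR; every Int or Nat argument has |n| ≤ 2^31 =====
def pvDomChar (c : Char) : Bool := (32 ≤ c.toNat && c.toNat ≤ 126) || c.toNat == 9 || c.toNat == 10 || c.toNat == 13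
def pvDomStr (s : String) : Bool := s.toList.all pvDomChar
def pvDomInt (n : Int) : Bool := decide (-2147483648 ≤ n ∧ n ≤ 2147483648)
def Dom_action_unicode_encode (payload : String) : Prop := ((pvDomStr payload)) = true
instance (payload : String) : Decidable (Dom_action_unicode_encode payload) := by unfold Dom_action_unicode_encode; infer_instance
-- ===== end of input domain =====

-- B replaces A's three chained scan+replace passes by a hard-coded escape table and one
-- left-to-right scan; the two agree on every payload (objective: alternative single-pass algorithm).

-- ===== PORT A =====

-- '{:x}' hex digit of n (exact for n < 16)
def pvHexDigit (n : Nat) : Char := if n < 10 then Char.ofNat (48 + n) else Char.ofNat (87 + n)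

-- "{:04x}".format n (exact for n < 65536; ASCII codes are < 65536)
def pvHex4 (n : Nat) : List Char :=
  [pvHexDigit (n / 4096 % 16), pvHexDigit (n / 256 % 16), pvHexDigit (n / 16 % 16), pvHexDigit (n % 16)]

-- "".join(["\\u{:04x}".format(ord(c)) for c in t])
def pvEncodeKw (t : String) : String :=
  PySem.Str.join "" (t.toList.map (fun c => String.ofList ('\\' :: 'u' :: pvHex4 c.toNat)))

-- for t in ["alert","prompt","confirm"]: if t in result: result = result.replace(t, encoded)
def action_unicode_encode (payload : String) : String :=
  ["alert", "prompt", "confirm"].foldl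
    (fun result t =>
      if PySem.Str.isIn t result then PySem.Str.replace result t (pvEncodeKw t) else result)
    payload

-- ===== PORT B =====

-- the hard-coded table _ENC of Source B, entry by entry (keys and their literal escape strings)
def pvKwA : List Char := "alert".toList
def pvKwP : List Char := "prompt".toList
def pvKwC : List Char := "confirm".toList
def pvEncA : List Char := "\\u0061\\u006c\\u0065\\u0072\\u0074".toList
def pvEncP : List Char := "\\u0070\\u0072\\u006f\\u006d\\u0070\\u0074".toList
def pvEncC : List Char := "\\u0063\\u006f\\u006e\\u0066\\u0069\\u0072\\u006d".toList

-- the while-loop of Source B: at index i try each table entry (payload.startswith(k, i)),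
-- emit its literal escape and skip len(k), else copy one char
def pvScan : List Char → List Char
  | [] => []
  | c :: t =>
    if List.isPrefixOf pvKwA (c :: t) then pvEncA ++ pvScan ((c :: t).drop pvKwA.length)
    else if List.isPrefixOf pvKwP (c :: t) then pvEncP ++ pvScan ((c :: t).drop pvKwP.length)
    else if List.isPrefixOf pvKwC (c :: t) then pvEncC ++ pvScan ((c :: t).drop pvKwC.length)
    else c :: pvScan t
termination_by l => l.length
decreasing_by all_goals simp [pvKwA, pvKwP, pvKwC]

def action_unicode_encode_alt (payload : String) : String :=
  String.ofList (pvScan payload.toList)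

-- ===== PRECONDITION & SPEC =====
def Spec_action_unicode_encode (payload : String) (out : String) : Prop := out = action_unicode_encode_alt payload
instance (payload : String) (out : String) : Decidable (Spec_action_unicode_encode payload out) := by unfold Spec_action_unicode_encode; infer_instance

-- ===== CLAIM (what is proved, stated in full; the proofs are below) =====
def Claim_equal_action_unicode_encode : Prop := ∀ (payload : String), Dom_action_unicode_encode payload → Spec_action_unicode_encode payload (action_unicode_encode payload)

-- ===== LEMMAS AND PROOFS =====

def pvRestA : List Char := ['l', 'e', 'r', 't']
def pvRestP : List Char := ['r', 'o', 'm', 'p', 't']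
def pvRestC : List Char := ['o', 'n', 'f', 'i', 'r', 'm']

-- a simple structural model of Python str.replace with a nonempty needle o :: os
def pvRepl (o : Char) (os new : List Char) : List Char → List Char
  | [] => []
  | c :: t =>
    if List.isPrefixOf (o :: os) (c :: t) then new ++ pvRepl o os new (t.drop os.length)
    else c :: pvRepl o os new t
termination_by l => l.length
decreasing_by all_goals simp

lemma pvRepl_go_eq (o : Char) (os new : List Char) :
    ∀ (fuel : Nat) (l acc : List Char), l.length ≤ fuel →
      PySem.Chars.replace.go (o :: os) new fuel l acc = acc.reverse ++ pvRepl o os new l := by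
  intro fuel
  induction fuel with
  | zero =>
    intro l acc h
    have hl : l = [] := by cases l <;> simp_all
    subst hl
    simp [PySem.Chars.replace.go, pvRepl]
  | succ n ih =>
    intro l acc h
    cases l with
    | nil => simp [PySem.Chars.replace.go, pvRepl]
    | cons c t =>
      by_cases hp : List.isPrefixOf (o :: os) (c :: t) = true
      · have hdrop : (c :: t).drop (o :: os).length = t.drop os.length := by simp
        have hlen : (t.drop os.length).length ≤ n := by
          simp at h ⊢; omega
        simp only [PySem.Chars.replace.go, hp, if_pos, hdrop]
        rw [ih _ _ hlen]
        simp [pvRepl, hp]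
      · have hlen : t.length ≤ n := by simp at h; omega
        simp only [PySem.Chars.replace.go, hp, Bool.false_eq_true, if_false]
        rw [ih _ _ hlen]
        simp [pvRepl, hp]

lemma pvReplace_eq (o : Char) (os new s : List Char) :
    PySem.Chars.replace s (o :: os) new = pvRepl o os new s := by
  simp only [PySem.Chars.replace, List.isEmpty_cons, Bool.false_eq_true, if_false]
  simpa using pvRepl_go_eq o os new s.length s [] le_rfl

-- replace of an absent needle is the identity
lemma pvRepl_id (o : Char) (os new : List Char) :
    ∀ s, ¬ (o :: os) <:+: s → pvRepl o os new s = s := by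
  intro s
  induction s with
  | nil => intro _; simp [pvRepl]
  | cons c t ih =>
    intro h
    have hp : List.isPrefixOf (o :: os) (c :: t) = false := by
      rw [Bool.eq_false_iff]
      intro hc
      exact h ((List.isPrefixOf_iff_prefix.mp hc).isInfix)
    have ht : ¬ (o :: os) <:+: t := fun hi => h (hi.trans (List.suffix_cons c t).isInfix)
    simp [pvRepl, hp, ih ht]

-- replace where the needle sits in front consumes it
lemma pvRepl_match (o : Char) (os new x : List Char) :
    pvRepl o os new ((o :: os) ++ x) = new ++ pvRepl o os new x := by
  have hp : List.isPrefixOf (o :: os) (o :: (os ++ x)) = true :=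
    List.isPrefixOf_iff_prefix.mpr ⟨x, by simp⟩
  simp only [List.cons_append, pvRepl, hp, if_pos]
  congr 1
  congr 1
  exact List.drop_left

-- no suffix of e is prefix-comparable with kw: replacing kw cannot touch e
def pvClean (kw e : List Char) : Bool :=
  (List.range e.length).all
    (fun i => !(List.isPrefixOf (e.drop i) kw) && !(List.isPrefixOf kw (e.drop i)))

lemma pvRepl_append (o : Char) (os new : List Char) :
    ∀ e x, pvClean (o :: os) e = true → pvRepl o os new (e ++ x) = e ++ pvRepl o os new x := by
  intro e
  induction e with
  | nil => intro x _; simp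
  | cons d e' ih =>
    intro x hcl
    have h0 := (List.all_eq_true.mp hcl) 0 (by simp [List.mem_range])
    simp only [List.drop_zero, Bool.and_eq_true, Bool.not_eq_true'] at h0
    obtain ⟨h0a, h0b⟩ := h0
    have hcl' : pvClean (o :: os) e' = true := by
      rw [pvClean, List.all_eq_true]
      intro i hi
      have := (List.all_eq_true.mp hcl) (i + 1) (by simp [List.mem_range] at hi ⊢; omega)
      simpa using this
    have hp : List.isPrefixOf (o :: os) (d :: (e' ++ x)) = false := by
      rw [Bool.eq_false_iff]
      intro hc
      have h1 : (o :: os) <+: (d :: e') ++ x := by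
        simpa using List.isPrefixOf_iff_prefix.mp hc
      have h2 : (d :: e') <+: (d :: e') ++ x := List.prefix_append _ _
      rcases List.prefix_or_prefix_of_prefix h1 h2 with h | h
      · exact absurd (List.isPrefixOf_iff_prefix.mpr h) (by simp [h0b])
      · exact absurd (List.isPrefixOf_iff_prefix.mpr h) (by simp [h0a])
    simp [pvRepl, hp, ih x hcl']

-- replacement text starting with '\' and a keyword without '\': a keyword visible
-- in the output was already visible in the input
lemma pvPrefix_of_repl (o : Char) (os n' : List Char) :
    ∀ (t kw : List Char), '\\' ∉ kw →
      List.isPrefixOf kw (pvRepl o os ('\\' :: n') t) = true →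
      List.isPrefixOf kw t = true := by
  intro t
  induction t with
  | nil => intro kw _ h; simpa [pvRepl] using h
  | cons c t' ih =>
    intro kw hkw h
    by_cases hp : List.isPrefixOf (o :: os) (c :: t') = true
    · rw [pvRepl, if_pos hp] at h
      cases kw with
      | nil => simp
      | cons k kw' =>
        exfalso
        simp only [List.cons_append, List.isPrefixOf, Bool.and_eq_true, beq_iff_eq] at h
        exact hkw (by simp [h.1])
    · rw [pvRepl, if_neg hp] at h
      cases kw with
      | nil => simp
      | cons k kw' =>
        simp only [List.isPrefixOf, Bool.and_eq_true, beq_iff_eq] at h ⊢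
        exact ⟨h.1, ih kw' (fun hm => hkw (List.mem_cons_of_mem _ hm)) h.2⟩

-- concrete facts about the keywords and their encodings
lemma pvKwA_eq : pvKwA = 'a' :: pvRestA := by decide
lemma pvKwP_eq : pvKwP = 'p' :: pvRestP := by decide
lemma pvKwC_eq : pvKwC = 'c' :: pvRestC := by decide
lemma pvEncA_head : pvEncA = '\\' :: pvEncA.tail := by decide
lemma pvEncP_head : pvEncP = '\\' :: pvEncP.tail := by decide
lemma pvClean_P_encA : pvClean ('p' :: pvRestP) pvEncA = true := by decide
lemma pvClean_C_encA : pvClean ('c' :: pvRestC) pvEncA = true := by decide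
lemma pvClean_C_encP : pvClean ('c' :: pvRestC) pvEncP = true := by decide
lemma pvClean_A_kwP : pvClean ('a' :: pvRestA) pvKwP = true := by decide
lemma pvClean_A_kwC : pvClean ('a' :: pvRestA) pvKwC = true := by decide
lemma pvClean_P_kwC : pvClean ('p' :: pvRestP) pvKwC = true := by decide
lemma pvNoBS_P : '\\' ∉ ('p' :: pvRestP) := by decide
lemma pvNoBS_C : '\\' ∉ ('c' :: pvRestC) := by decide

-- the three chained replaces equal the single scan
lemma pvChain (n : Nat) :
    ∀ l : List Char, l.length ≤ n →
      pvRepl 'c' pvRestC pvEncC (pvRepl 'p' pvRestP pvEncP (pvRepl 'a' pvRestA pvEncA l))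
        = pvScan l := by
  induction n with
  | zero =>
    intro l h
    have hl : l = [] := by cases l <;> simp_all
    subst hl
    simp [pvRepl, pvScan]
  | succ m ih =>
    intro l h
    cases l with
    | nil => simp [pvRepl, pvScan]
    | cons c t =>
      by_cases hA : List.isPrefixOf pvKwA (c :: t) = true
      · obtain ⟨r, hr⟩ := List.isPrefixOf_iff_prefix.mp hA
        have hlr : r.length ≤ m := by
          have := congrArg List.length hr
          simp [pvKwA] at this
          simp at h; omega
        rw [← hr, pvKwA_eq]
        rw [pvRepl_match, pvRepl_append _ _ _ _ _ pvClean_P_encA,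
            pvRepl_append _ _ _ _ _ pvClean_C_encA, ih r hlr]
        have hA' : List.isPrefixOf pvKwA (('a' :: pvRestA) ++ r) = true := by
          rw [← pvKwA_eq]; exact List.isPrefixOf_iff_prefix.mpr ⟨r, rfl⟩
        simp only [pvRestA, List.cons_append, List.nil_append] at hA' ⊢
        rw [pvScan, if_pos hA']
        simp [pvKwA]
      · by_cases hP : List.isPrefixOf pvKwP (c :: t) = true
        · obtain ⟨r, hr⟩ := List.isPrefixOf_iff_prefix.mp hP
          have hlr : r.length ≤ m := by
            have := congrArg List.length hr
            simp [pvKwP] at this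
            simp at h; omega
          rw [← hr, pvKwP_eq]
          rw [pvRepl_append _ _ _ _ _ (by rw [← pvKwP_eq]; exact pvClean_A_kwP),
              pvRepl_match, pvRepl_append _ _ _ _ _ pvClean_C_encP, ih r hlr]
          have hA' : List.isPrefixOf pvKwA (('p' :: pvRestP) ++ r) = false := by
            rw [← pvKwP_eq, hr]; exact Bool.eq_false_iff.mpr hA
          have hP' : List.isPrefixOf pvKwP (('p' :: pvRestP) ++ r) = true := by
            rw [← pvKwP_eq]; exact List.isPrefixOf_iff_prefix.mpr ⟨r, rfl⟩
          simp only [pvRestP, List.cons_append, List.nil_append] at hA' hP' ⊢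
          rw [pvScan, if_neg (by simp [hA']), if_pos hP']
          simp [pvKwP]
        · by_cases hC : List.isPrefixOf pvKwC (c :: t) = true
          · obtain ⟨r, hr⟩ := List.isPrefixOf_iff_prefix.mp hC
            have hlr : r.length ≤ m := by
              have := congrArg List.length hr
              simp [pvKwC] at this
              simp at h; omega
            rw [← hr, pvKwC_eq]
            rw [pvRepl_append _ _ _ _ _ (by rw [← pvKwC_eq]; exact pvClean_A_kwC),
                pvRepl_append _ _ _ _ _ (by rw [← pvKwC_eq]; exact pvClean_P_kwC),
                pvRepl_match, ih r hlr]
            have hA' : List.isPrefixOf pvKwA (('c' :: pvRestC) ++ r) = false := by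
              rw [← pvKwC_eq, hr]; exact Bool.eq_false_iff.mpr hA
            have hP' : List.isPrefixOf pvKwP (('c' :: pvRestC) ++ r) = false := by
              rw [← pvKwC_eq, hr]; exact Bool.eq_false_iff.mpr hP
            have hC' : List.isPrefixOf pvKwC (('c' :: pvRestC) ++ r) = true := by
              rw [← pvKwC_eq]; exact List.isPrefixOf_iff_prefix.mpr ⟨r, rfl⟩
            simp only [pvRestC, List.cons_append, List.nil_append] at hA' hP' hC' ⊢
            rw [pvScan, if_neg (by simp [hA']), if_neg (by simp [hP']), if_pos hC']
            simp [pvKwC]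
          · -- no keyword starts here: all three replaces copy c
            have hlt : t.length ≤ m := by simp at h; omega
            have e1 : pvRepl 'a' pvRestA pvEncA (c :: t)
                = c :: pvRepl 'a' pvRestA pvEncA t := by
              rw [pvRepl, if_neg (by rw [← pvKwA_eq]; exact hA)]
            have hPout : List.isPrefixOf pvKwP (c :: pvRepl 'a' pvRestA pvEncA t) = false := by
              rw [Bool.eq_false_iff]
              intro hc
              rw [← e1] at hc
              rw [pvKwP_eq] at hc
              rw [pvEncA_head] at hc
              have := pvPrefix_of_repl _ _ _ _ _ pvNoBS_P hc
              rw [← pvKwP_eq] at this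
              exact absurd this (Bool.eq_false_iff.mp (Bool.eq_false_iff.mpr hP))
            have e2 : pvRepl 'p' pvRestP pvEncP (pvRepl 'a' pvRestA pvEncA (c :: t))
                = c :: pvRepl 'p' pvRestP pvEncP (pvRepl 'a' pvRestA pvEncA t) := by
              rw [e1, pvRepl, if_neg (by rw [← pvKwP_eq]; simp [hPout])]
            have hCout : List.isPrefixOf pvKwC
                (c :: pvRepl 'p' pvRestP pvEncP (pvRepl 'a' pvRestA pvEncA t)) = false := by
              rw [Bool.eq_false_iff]
              intro hc
              rw [← e2] at hc
              rw [pvKwC_eq, pvEncP_head] at hc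
              have h1 := pvPrefix_of_repl _ _ _ _ _ pvNoBS_C hc
              rw [pvEncA_head] at h1
              have h2 := pvPrefix_of_repl _ _ _ _ _ pvNoBS_C h1
              rw [← pvKwC_eq] at h2
              exact absurd h2 (Bool.eq_false_iff.mp (Bool.eq_false_iff.mpr hC))
            have e3 : pvRepl 'c' pvRestC pvEncC
                (pvRepl 'p' pvRestP pvEncP (pvRepl 'a' pvRestA pvEncA (c :: t)))
                = c :: pvRepl 'c' pvRestC pvEncC
                    (pvRepl 'p' pvRestP pvEncP (pvRepl 'a' pvRestA pvEncA t)) := by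
              rw [e2, pvRepl, if_neg (by rw [← pvKwC_eq]; simp [hCout])]
            rw [e3, ih t hlt]
            rw [pvScan, if_neg (by simp [hA]), if_neg (by simp [hP]), if_neg (by simp [hC])]

-- one pass of A's loop body, at the character level
lemma pvStep_toList (kw enc : String) (o : Char) (os new : List Char)
    (hkw : kw.toList = o :: os) (henc : enc.toList = new) (r : String) :
    (if PySem.Str.isIn kw r then PySem.Str.replace r kw enc else r).toList
      = pvRepl o os new r.toList := by
  by_cases h : PySem.Str.isIn kw r = true
  · rw [if_pos h, PySem.Str.toList_replace, hkw, henc, pvReplace_eq]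
  · rw [if_neg (by simpa using h)]
    have hfalse : PySem.Chars.isIn kw.toList r.toList = false := by simpa using h
    have hinf : ¬ (o :: os) <:+: r.toList := by
      rw [← hkw]
      exact (PySem.Chars.isIn_eq_false_iff _ _).mp hfalse
    exact (pvRepl_id o os new _ hinf).symm

lemma pvA_toList (payload : String) :
    (action_unicode_encode payload).toList =
      pvRepl 'c' pvRestC pvEncC (pvRepl 'p' pvRestP pvEncP (pvRepl 'a' pvRestA pvEncA payload.toList)) := by
  simp only [action_unicode_encode, List.foldl]
  rw [pvStep_toList "confirm" (pvEncodeKw "confirm") 'c' pvRestC pvEncC (by decide) (by decide),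
      pvStep_toList "prompt" (pvEncodeKw "prompt") 'p' pvRestP pvEncP (by decide) (by decide),
      pvStep_toList "alert" (pvEncodeKw "alert") 'a' pvRestA pvEncA (by decide) (by decide)]

-- ===== VERDICT (by name: the statement is the Claim_ definition above) =====
theorem action_unicode_encode_spec : Claim_equal_action_unicode_encode := by
  unfold Claim_equal_action_unicode_encode Spec_action_unicode_encode
  intro payload _
  have h1 := pvA_toList payload
  rw [pvChain (payload.toList.length) payload.toList le_rfl] at h1
  calc action_unicode_encode payload
      = String.ofList ((action_unicode_encode payload).toList) := String.ofList_toList.symm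
    _ = String.ofList (pvScan payload.toList) := by rw [h1]
    _ = action_unicode_encode_alt payload := rfl
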